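-- pv_equiv track=rewrite | github.com/ruitao-edward-chen/narrative_agent | src/narrative_agent/utils/json_parser.py | complete_quotes
-- ===== SOURCE A (Python) =====
-- def complete_quotes(s: str) -> str:
--     """
--     Heuristic: if the number of unescaped double quotes is odd,
--     assume one is missing and append one.
--
--     Args:
--         s: Input string
--
--     Returns:
--         String with completed quotes
--     """
--     count = 0
--     escape = False
--     for char in s:
--         if escape:
--             escape = False
--             continue
--         if char == "\\":
--             escape = True
--             continue
--         if char == '"':
--             count += 1
--     if count % 2 != 0:
--         s += '"'
--     return s
-- ===== SOURCE B (Python) =====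
-- def complete_quotes(s: str) -> str:
--     """Split on '"': the quote after a segment is unescaped iff the segment
--     ends in an even number of backslashes; append '"' if that count is odd."""
--     parts = s.split('"')
--     unescaped = sum(1 for p in parts[:-1]
--                     if (len(p) - len(p.rstrip('\\'))) % 2 == 0)
--     if unescaped % 2 == 1:
--         s += '"'
--     return s
-- ===== Notes on version B (the rewrite author's own statement) =====
-- stated objective: alternative
-- what changed: Replaced A's single-pass escape-state character loop with splitting on the double-quote character plus a trailing-backslash parity test per segment (a quote is unescaped iff the segment before it ends in an even number of backslashes).
import Mathlib
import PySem

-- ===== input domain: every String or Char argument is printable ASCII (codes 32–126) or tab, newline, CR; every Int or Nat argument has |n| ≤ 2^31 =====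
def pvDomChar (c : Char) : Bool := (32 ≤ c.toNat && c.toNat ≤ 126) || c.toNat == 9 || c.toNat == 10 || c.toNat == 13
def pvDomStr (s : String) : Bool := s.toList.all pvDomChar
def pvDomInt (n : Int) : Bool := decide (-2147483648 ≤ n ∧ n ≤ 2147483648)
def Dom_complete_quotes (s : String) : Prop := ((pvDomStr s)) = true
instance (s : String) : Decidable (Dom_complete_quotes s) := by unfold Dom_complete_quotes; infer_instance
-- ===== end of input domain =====

-- B replaces A's escape-state character loop by split-on-quotes plus a trailing-backslash
-- parity test per segment (alternative decomposition, same cost).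

-- ===== PORT A =====
-- A's for-loop over the characters with its (count, escape) state, branch for branch.
def cqLoopA : List Char → Int → Bool → Int
  | [], count, _ => count
  | _ :: rest, count, true => cqLoopA rest count false
  | c :: rest, count, false =>
    if c = '\\' then cqLoopA rest count true
    else if c = '"' then cqLoopA rest (count + 1) false
    else cqLoopA rest count false

def complete_quotes (s : String) : String :=
  let count := cqLoopA s.toList 0 false
  if count % 2 ≠ 0 then s ++ "\"" else s

-- ===== PORT B =====
-- s.split('"') on the character list (exact for a one-character separator).
def cqSplit : List Char → List (List Char)
  | [] => [[]]
  | '"' :: t => [] :: cqSplit t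
  | c :: t =>
    match cqSplit t with
    | p :: ps => (c :: p) :: ps
    | [] => [[c]]

-- p.rstrip('\\'): remove trailing backslashes.
def cqRstripBS : List Char → List Char
  | [] => []
  | c :: t =>
    let r := cqRstripBS t
    if c = '\\' ∧ r = [] then [] else c :: r

def complete_quotes_alt (s : String) : String :=
  let parts := cqSplit s.toList
  let unescaped := (parts.dropLast.filter
      (fun p => (p.length - (cqRstripBS p).length) % 2 == 0)).length
  if unescaped % 2 = 1 then s ++ "\"" else s

-- ===== PRECONDITION & SPEC =====
def Spec_complete_quotes (s : String) (out : String) : Prop := out = complete_quotes_alt s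
instance (s : String) (out : String) : Decidable (Spec_complete_quotes s out) := by unfold Spec_complete_quotes; infer_instance

-- ===== CLAIM (what is proved, stated in full; the proofs are below) =====
def Claim_equal_complete_quotes : Prop := ∀ (s : String), Dom_complete_quotes s → Spec_complete_quotes s (complete_quotes s)

-- ===== LEMMAS AND PROOFS =====

-- B's unescaped-quote count, as a function of the parts list.
def cqCntB (parts : List (List Char)) : Nat :=
  (parts.dropLast.filter (fun p => (p.length - (cqRstripBS p).length) % 2 == 0)).length

theorem cqSplit_ne_nil (l : List Char) : cqSplit l ≠ [] := by
  induction l using cqSplit.induct with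
  | case1 => simp [cqSplit]
  | case2 t ih => simp [cqSplit]
  | case3 c t h p ps hps ih => simp [cqSplit, hps]
  | case4 c t h hnil ih => exact absurd hnil ih

-- trailing-backslash count of c :: p for a non-backslash c equals that of p
theorem cqTrail_cons_ne (c : Char) (p : List Char) (hc : c ≠ '\\') :
    (c :: p).length - (cqRstripBS (c :: p)).length = p.length - (cqRstripBS p).length := by
  have : cqRstripBS (c :: p) = c :: cqRstripBS p := by
    simp [cqRstripBS, hc]
  simp [this]

-- a backslash before a non-backslash leaves the trailing-backslash count unchanged
theorem cqTrail_bs_cons (c : Char) (p : List Char) (hc : c ≠ '\\') :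
    ('\\' :: c :: p).length - (cqRstripBS ('\\' :: c :: p)).length
      = (c :: p).length - (cqRstripBS (c :: p)).length := by
  have h1 : cqRstripBS (c :: p) = c :: cqRstripBS p := by simp [cqRstripBS, hc]
  have h2 : cqRstripBS ('\\' :: c :: p) = '\\' :: cqRstripBS (c :: p) := by
    simp [cqRstripBS, hc]
  simp [h2]

-- prepending two backslashes preserves the parity of the trailing-backslash count
theorem cqTrail_two_bs (p : List Char) :
    (('\\' :: '\\' :: p).length - (cqRstripBS ('\\' :: '\\' :: p)).length) % 2
      = (p.length - (cqRstripBS p).length) % 2 := by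
  by_cases h : cqRstripBS p = []
  · simp [cqRstripBS, h]
    omega
  · have h2 : cqRstripBS ('\\' :: '\\' :: p) = '\\' :: '\\' :: cqRstripBS p := by
      simp [cqRstripBS, h]
    simp [h2]

-- cqCntB of a parts list with a prepended-to-head segment of equal trailing parity
theorem cqCntB_cons_congr (p q : List Char) (ps : List (List Char))
    (h : (p.length - (cqRstripBS p).length) % 2 = (q.length - (cqRstripBS q).length) % 2) :
    cqCntB (p :: ps) = cqCntB (q :: ps) := by
  cases ps with
  | nil => simp [cqCntB]
  | cons r rs =>
    simp only [cqCntB, List.dropLast, List.filter, h]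
    split <;> simp

-- recursion shape used for the main induction
def cqM : List Char → Nat
  | [] => 0
  | ['\\'] => 0
  | '\\' :: '"' :: t => cqM t
  | '\\' :: '\\' :: t => cqM t
  | '\\' :: c :: t => cqM (c :: t)
  | _ :: t => cqM t

-- A's running count, from escape-off state, is n plus B's unescaped-quote count.
theorem cqLoopA_eq_cntB (l : List Char) :
    ∀ n : Int, cqLoopA l n false = n + (cqCntB (cqSplit l) : Int) := by
  induction l using cqM.induct with
  | case1 => intro n; simp [cqLoopA, cqSplit, cqCntB]
  | case2 => intro n; simp [cqLoopA, cqSplit, cqCntB]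
  | case3 t ih =>
    intro n
    obtain ⟨p, ps, hps⟩ := List.exists_cons_of_ne_nil (cqSplit_ne_nil t)
    have hs : cqSplit ('\\' :: '"' :: t) = ['\\'] :: cqSplit t := by
      simp [cqSplit, hps]
    have hcnt : cqCntB (['\\'] :: cqSplit t) = cqCntB (cqSplit t) := by
      rw [hps]
      simp [cqCntB, cqRstripBS]
    simp only [cqLoopA, hs, hcnt]
    exact ih n
  | case4 t ih =>
    intro n
    obtain ⟨p, ps, hps⟩ := List.exists_cons_of_ne_nil (cqSplit_ne_nil t)
    have hs : cqSplit ('\\' :: '\\' :: t) = ('\\' :: '\\' :: p) :: ps := by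
      simp [cqSplit, hps]
    have hcnt : cqCntB (cqSplit ('\\' :: '\\' :: t)) = cqCntB (cqSplit t) := by
      rw [hs, hps]
      exact cqCntB_cons_congr _ _ _ (cqTrail_two_bs p)
    simp only [cqLoopA, hcnt]
    exact ih n
  | case5 c t hq hb ih =>
    intro n
    have hc : c ≠ '\\' := hb
    have hcq : c ≠ '"' := hq
    obtain ⟨p, ps, hps⟩ := List.exists_cons_of_ne_nil (cqSplit_ne_nil t)
    have hs1 : cqSplit (c :: t) = (c :: p) :: ps := by
      simp [cqSplit, hps]
    have hs2 : cqSplit ('\\' :: c :: t) = ('\\' :: c :: p) :: ps := by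
      simp [cqSplit, hs1]
    have hcnt : cqCntB (cqSplit ('\\' :: c :: t)) = cqCntB (cqSplit (c :: t)) := by
      rw [hs2, hs1]
      refine cqCntB_cons_congr _ _ _ ?_
      rw [cqTrail_bs_cons c p hc]
    have hl : cqLoopA ('\\' :: c :: t) n false = cqLoopA (c :: t) n false := by
      simp [cqLoopA, hc, hcq]
    rw [hl, hcnt]
    exact ih n
  | case6 c t h1 h2 h3 h4 ih =>
    intro n
    have hc : c ≠ '\\' := by
      intro he
      cases t with
      | nil => exact h1 he rfl
      | cons x t1 => exact h4 x t1 he rfl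
    obtain ⟨p, ps, hps⟩ := List.exists_cons_of_ne_nil (cqSplit_ne_nil t)
    by_cases hcq : c = '"'
    · subst hcq
      have hs : cqSplit ('"' :: t) = [] :: cqSplit t := by simp [cqSplit]
      have hcnt : cqCntB ([] :: cqSplit t) = 1 + cqCntB (cqSplit t) := by
        rw [hps]
        simp [cqCntB, cqRstripBS, Nat.add_comm]
      have hl : cqLoopA ('"' :: t) n false = cqLoopA t (n + 1) false := by
        simp [cqLoopA]
      rw [hl, hs, hcnt, ih (n + 1)]
      push_cast
      ring
    · have hs : cqSplit (c :: t) = (c :: p) :: ps := by simp [cqSplit, hps]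
      have hcnt : cqCntB (cqSplit (c :: t)) = cqCntB (cqSplit t) := by
        rw [hs, hps]
        exact cqCntB_cons_congr _ _ _ (by rw [cqTrail_cons_ne c p hc])
      have hl : cqLoopA (c :: t) n false = cqLoopA t n false := by
        simp [cqLoopA, hc, hcq]
      rw [hl, hcnt]
      exact ih n

-- ===== VERDICT (by name: the statement is the Claim_ definition above) =====
theorem complete_quotes_spec : Claim_equal_complete_quotes := by
  intro s _
  unfold Spec_complete_quotes complete_quotes complete_quotes_alt
  have h := cqLoopA_eq_cntB s.toList 0
  simp only [zero_add] at h
  rw [h]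
  change _ = (if cqCntB (cqSplit s.toList) % 2 = 1 then s ++ "\"" else s)
  by_cases hk : cqCntB (cqSplit s.toList) % 2 = 1
  · have h1 : (cqCntB (cqSplit s.toList) : Int) % 2 ≠ 0 := by omega
    rw [if_pos h1, if_pos hk]
  · have h1 : ¬((cqCntB (cqSplit s.toList) : Int) % 2 ≠ 0) := by omega
    rw [if_neg h1, if_neg hk]
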